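-- pv_equiv track=rewrite | github.com/JasonZuu/MedTPE | tpe/vocab_modify_tpe.py | get_all_merge_paths
-- ===== SOURCE A (Python) =====
-- from typing import Optional, Dict, List, Tuple
--
-- def get_all_merge_paths(subtokens: List[str]) -> List[List[Tuple[str, str]]]:
--     """
--     Enumerate all full merge paths for a list of subtokens.
--
--     Args:
--         subtokens: List of subtokens, e.g. ["a", "b", "c", "d"]
--
--     Returns:
--         A list of merge-sequences. Each merge-sequence is a list of tuples,
--         where each tuple is (left, right) tokens that were merged at that step.
--         The sequence has length len(subtokens) - 1.
--     """
--     if len(subtokens) <= 1: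
--         return [[]]
--
--     all_merge_paths = []
--
--     # try merging each adjacent pair of subtokens
--     for i in range(len(subtokens) - 1):
--         left = subtokens[i]
--         right = subtokens[i + 1]
--         merged = left + right
--
--         # construct the next subtokens list
--         next_tokens = (
--             subtokens[:i] +         # the unchanged prefix
--             [merged] +              # newly merged token
--         subtokens[i + 2:]           # the unchanged suffix
--         )
--
--         # recursively get all merge paths for the next tokens
--         for suffix_path in get_all_merge_paths(next_tokens):
--             # put together the current merge with the suffix path
--             all_merge_paths.append([(left, right)] + suffix_path)
--
--     return all_merge_paths
-- ===== SOURCE B (Python) =====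
-- from typing import List, Tuple
--
-- def get_all_merge_paths(subtokens: List[str]) -> List[List[Tuple[str, str]]]:
--     # Iterative explicit-stack DFS instead of recursion; children pushed in
--     # reverse index order so the leftmost merge is expanded first (A's order).
--     results = []
--     stack = [(list(subtokens), [])]
--     while stack:
--         cur, path = stack.pop()
--         n = len(cur)
--         if n <= 1:
--             results.append(path)
--             continue
--         for i in range(n - 2, -1, -1):
--             left, right = cur[i], cur[i + 1]
--             stack.append((cur[:i] + [left + right] + cur[i + 2:],
--                           path + [(left, right)]))
--     return results
-- ===== Notes on version B (the rewrite author's own statement) =====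
-- stated objective: alternative
-- what changed: Replaces A's recursive enumeration with an iterative explicit-stack DFS that carries (current_tokens, path) states and pushes adjacent-merge children in reverse index order to preserve A's output order.
import Mathlib
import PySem

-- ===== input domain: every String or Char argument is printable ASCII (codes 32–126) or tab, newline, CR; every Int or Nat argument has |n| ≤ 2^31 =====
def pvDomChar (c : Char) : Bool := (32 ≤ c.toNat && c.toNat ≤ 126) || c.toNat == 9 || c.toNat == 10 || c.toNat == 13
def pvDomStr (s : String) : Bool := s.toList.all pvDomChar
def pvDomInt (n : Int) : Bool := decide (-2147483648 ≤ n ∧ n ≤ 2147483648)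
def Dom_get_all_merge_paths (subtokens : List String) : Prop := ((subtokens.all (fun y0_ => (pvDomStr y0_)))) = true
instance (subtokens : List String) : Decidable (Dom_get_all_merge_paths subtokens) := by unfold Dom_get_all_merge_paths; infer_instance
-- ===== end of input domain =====

-- B replaces A's recursive enumeration by an iterative explicit-stack DFS (same cost, different decomposition); return values proved equal.

-- ===== PORT A =====
-- literal port of A: recursion on the token list, merging each adjacent pair
def get_all_merge_paths (subtokens : List String) : List (List (String × String)) :=
  if _h : subtokens.length ≤ 1 then [[]]
  else
    (List.range (subtokens.length - 1)).attach.flatMap (fun i =>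
      let left := subtokens.getD i.1 ""
      let right := subtokens.getD (i.1 + 1) ""
      let merged := left ++ right
      let next_tokens := subtokens.take i.1 ++ [merged] ++ subtokens.drop (i.1 + 2)
      (get_all_merge_paths next_tokens).map (fun suffix_path => (left, right) :: suffix_path))
termination_by subtokens.length
decreasing_by
  have hi := List.mem_range.mp i.2
  simp only [List.length_append, List.length_take, List.length_drop, List.length_cons,
    List.length_nil]
  omega

-- ===== PORT B =====
-- weight of a node = total number of stack pops its subtree causes (termination measure)
def pvW : Nat → Nat
  | 0 => 1
  | 1 => 1
  | (n + 2) => 1 + (n + 1) * pvW (n + 1)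

def pvMeas (st : List (List String × List (String × String))) : Nat :=
  (st.map (fun s => pvW s.1.length)).sum

theorem pvW_pos (n : Nat) : 1 ≤ pvW n := by
  match n with
  | 0 => simp [pvW]
  | 1 => simp [pvW]
  | (k + 2) => simp [pvW]

-- pushing the elements of l onto a head-is-top stack in reverse order = prepending l.map f
theorem pvW_succ (n : Nat) (h : 2 ≤ n) : pvW n = 1 + (n - 1) * pvW (n - 1) := by
  obtain ⟨k, rfl⟩ : ∃ k, n = k + 2 := ⟨n - 2, by omega⟩
  simp [pvW]

theorem pvFoldl_rev_cons {α β : Type} (f : α → β) (l : List α) (rest : List β) :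
    (l.reverse).foldl (fun st i => f i :: st) rest = l.map f ++ rest := by
  induction l generalizing rest with
  | nil => simp
  | cons a t ih => simp [List.foldl_append, ih]

-- the stack loop of B: pop, emit finished paths, push the (reversed) children
def pvRunB (stack : List (List String × List (String × String))) : List (List (String × String)) :=
  match stack with
  | [] => []
  | (cur, path) :: rest =>
    if _h : cur.length ≤ 1 then path :: pvRunB rest
    else
      pvRunB (((List.range (cur.length - 1)).reverse).foldl
        (fun st i =>
          ((cur.take i ++ [cur.getD i "" ++ cur.getD (i + 1) ""] ++ cur.drop (i + 2)),
           path ++ [(cur.getD i "", cur.getD (i + 1) "")]) :: st) rest)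
termination_by pvMeas stack
decreasing_by
  · have := pvW_pos cur.length
    simp only [pvMeas, List.map_cons, List.sum_cons]
    omega
  · rw [pvFoldl_rev_cons]
    simp only [pvMeas, List.map_append, List.sum_append, List.map_map, List.map_cons,
      List.sum_cons]
    have hconst : (List.range (cur.length - 1)).map
        ((fun s => pvW s.1.length) ∘ (fun i =>
          ((cur.take i ++ [cur.getD i "" ++ cur.getD (i + 1) ""] ++ cur.drop (i + 2)),
           path ++ [(cur.getD i "", cur.getD (i + 1) "")])))
        = (List.range (cur.length - 1)).map (fun _ => pvW (cur.length - 1)) := by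
      refine List.map_congr_left (fun i hmem => ?_)
      simp only [List.mem_range] at hmem
      simp only [Function.comp]
      congr 1
      simp only [List.length_append, List.length_take, List.length_drop, List.length_cons,
        List.length_nil]
      omega
    rw [hconst]
    have hsum : ((List.range (cur.length - 1)).map (fun _ => pvW (cur.length - 1))).sum
        = (cur.length - 1) * pvW (cur.length - 1) := by
      simp [List.map_const', List.sum_replicate, smul_eq_mul]
    rw [hsum, pvW_succ cur.length (by omega)]
    omega

def get_all_merge_paths_alt (subtokens : List String) : List (List (String × String)) :=
  pvRunB [(subtokens, [])]

-- ===== PRECONDITION & SPEC =====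
def Spec_get_all_merge_paths (subtokens : List String) (out : List (List (String × String))) : Prop := out = get_all_merge_paths_alt subtokens
instance (subtokens : List String) (out : List (List (String × String))) : Decidable (Spec_get_all_merge_paths subtokens out) := by unfold Spec_get_all_merge_paths; infer_instance

-- ===== CLAIM (what is proved, stated in full; the proofs are below) =====
def Claim_equal_get_all_merge_paths : Prop := ∀ (subtokens : List String), Dom_get_all_merge_paths subtokens → Spec_get_all_merge_paths subtokens (get_all_merge_paths subtokens)

-- ===== LEMMAS AND PROOFS =====

theorem pvFlatMap_attach {α β : Type} (l : List α) (F : α → List β) :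
    l.attach.flatMap (fun x => F x.1) = l.flatMap F := by
  conv_rhs => rw [← List.attach_map_subtype_val l]
  rw [List.flatMap_map]

-- the stack loop computes, for each stack entry, A's result prefixed by the carried path
theorem pvRunB_eq (st : List (List String × List (String × String))) :
    pvRunB st = st.flatMap (fun s => (get_all_merge_paths s.1).map (fun sp => s.2 ++ sp)) := by
  induction st using pvRunB.induct with
  | case1 => simp [pvRunB]
  | case2 cur path rest h ih =>
    rw [pvRunB]
    simp only [dif_pos h, ih, List.flatMap_cons]
    rw [get_all_merge_paths]
    simp [h]
  | case3 cur path rest h ih =>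
    rw [pvRunB]
    simp only [dif_neg h]
    rw [ih, pvFoldl_rev_cons, List.flatMap_append, List.flatMap_cons]
    congr 1
    rw [get_all_merge_paths]
    simp only [dif_neg h]
    rw [List.flatMap_map]
    rw [List.map_flatMap]
    have key := pvFlatMap_attach (List.range (cur.length - 1))
      (fun i => ((get_all_merge_paths
          (cur.take i ++ [cur.getD i "" ++ cur.getD (i + 1) ""] ++ cur.drop (i + 2))).map
            (fun suffix_path => (cur.getD i "", cur.getD (i + 1) "") :: suffix_path)).map
          (fun sp => path ++ sp))
    simp only [key]
    congr 1
    funext i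
    simp only [List.map_map]
    refine List.map_congr_left (fun sp _ => ?_)
    simp

theorem get_all_merge_paths_spec : Claim_equal_get_all_merge_paths := by
  intro subtokens _
  unfold Spec_get_all_merge_paths get_all_merge_paths_alt
  rw [pvRunB_eq]
  simp
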